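-- pv_equiv track=rewrite | github.com/sooop/blog-test-astro | src/content/project-euler/pys/e053.py | nCr3
-- ===== SOURCE A (Python) =====
-- def gcd(a, b):
--     if b > a:
--         return gcd(b, a)
--     r = a % b
--     if r == 0:
--         return b
--     return gcd(b, r)
--
-- def nCr3(n: int, r: int) -> int:
--     # 1,000,000 보다 큰 경우에는 0을 리턴
--     xs = list(range(n - r + 1, n + 1))
--     ys = list(range(1, r + 1))
--     for i in range(r):
--         if all(y == 1 for y in ys):
--             break
--         for j in range(r):
--             g = gcd(xs[i], ys[j])
--             if g > 1:
--                 xs[i], ys[j] = xs[i] // g, ys[j] // g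
--     res = 1
--     for x in sorted(xs):
--         res = res * x
--         assert x < 2**31
--         if res >= 100_0000:
--             return 100_0000
--     return res
-- ===== SOURCE B (Python) =====
-- def nCr3(n: int, r: int) -> int:
--     res = 1
--     for i in range(1, r + 1):
--         res = res * (n - r + i) // i
--         if res >= 100_0000:
--             return 100_0000
--     return res
-- ===== Notes on version B (the rewrite author's own statement) =====
-- stated objective: faster
-- what changed: Replaced the O(r^2) pairwise gcd-cancellation of numerator/denominator lists followed by a sort-and-multiply pass with the single-pass incremental multiplicative formula res = res*(n-r+i)//i (exact at every step), keeping the same early exit at the 1,000,000 cap.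
-- crash fix: For 2 <= r with n < r, A's recursive gcd is fed nonpositive numbers and raises RecursionError or ZeroDivisionError, and at (2**31, 1) A's 'assert x < 2**31' raises AssertionError; B returns the natural binomial value there (0 for 0 <= n < r, a signed generalized-binomial value for n < 0, 1000000 at (2**31,1)). — e.g. on nCr3(1, 3): A raises ZeroDivisionError, B returns 0
import Mathlib
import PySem

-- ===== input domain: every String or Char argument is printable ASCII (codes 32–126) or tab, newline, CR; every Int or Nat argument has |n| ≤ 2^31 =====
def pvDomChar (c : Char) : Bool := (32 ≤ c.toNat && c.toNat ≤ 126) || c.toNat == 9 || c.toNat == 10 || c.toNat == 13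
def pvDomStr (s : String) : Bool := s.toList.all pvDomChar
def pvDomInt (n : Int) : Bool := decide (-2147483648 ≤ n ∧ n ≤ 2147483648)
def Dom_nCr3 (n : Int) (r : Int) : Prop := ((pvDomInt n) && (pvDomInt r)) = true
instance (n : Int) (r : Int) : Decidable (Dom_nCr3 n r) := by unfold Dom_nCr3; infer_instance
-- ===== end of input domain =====

-- B replaces A's O(r^2) pairwise gcd cancellation + sort-and-multiply by the one-pass exact
-- multiplicative formula res = res*(n-r+i)//i with the same early exit at the 1,000,000 cap.

-- ===== PORT A =====

-- Python's recursive gcd; the `b ≤ 0` branch is only a totality guard: Python never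
-- terminates (or raises ZeroDivisionError) there, and Pre_ keeps all gcd arguments positive.
def pygcd (a b : Int) : Int :=
  if b ≤ 0 then 0
  else if b > a then pygcd b a
  else if PySem.Int.mod a b = 0 then b
  else pygcd b (PySem.Int.mod a b)
termination_by b.toNat
decreasing_by
  · omega
  · have h1 : PySem.Int.mod a b = a % b := PySem.Int.mod_eq_emod_of_pos (by omega)
    have _h2 : 0 ≤ a % b := Int.emod_nonneg a (by omega)
    have _h3 : a % b < b := Int.emod_lt_of_pos a (by omega)
    omega

-- the inner `for j in range(r)` loop of A: state is xs[i] (here x) and the list ys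
def innerA : Int → List Int → List Int → Int × List Int
  | x, ys, [] => (x, ys)
  | x, ys, j :: js =>
    let g := pygcd x (PySem.List.pyGetD ys j 0)
    if g > 1 then
      innerA (PySem.Int.floordiv x g)
        (PySem.List.pySetD ys j (PySem.Int.floordiv (PySem.List.pyGetD ys j 0) g)) js
    else innerA x ys js

-- the outer `for i in range(r)` loop of A, with its `all(y == 1 …)` break
def outerA (r : Int) : List Int → List Int → List Int → List Int × List Int
  | [], xs, ys => (xs, ys)
  | i :: is, xs, ys =>
    if ys.all (fun y => y == 1) then (xs, ys)
    else
      let p := innerA (PySem.List.pyGetD xs i 0) ys (PySem.List.pyRange 0 r 1)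
      outerA r is (PySem.List.pySetD xs i p.1) p.2

-- the final `for x in sorted(xs)` loop with the early `return 100_0000`
-- (A's `assert x < 2**31` can only fire at (2^31, 1), which Pre_ excludes)
def resLoopA : List Int → Int → Int
  | [], res => res
  | x :: t, res =>
    let res' := res * x
    if res' ≥ 1000000 then 1000000 else resLoopA t res'

def nCr3 (n : Int) (r : Int) : Int :=
  let xs := PySem.List.pyRange (n - r + 1) (n + 1) 1
  let ys := PySem.List.pyRange 1 (r + 1) 1
  let p := outerA r (PySem.List.pyRange 0 r 1) xs ys
  resLoopA (PySem.List.sorted p.1 (fun x => x) false) 1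

-- ===== PORT B =====

-- the `for i in range(1, r+1)` loop of Source B: res = res*(n-r+i)//i, early exit at the cap
def altLoopB (n r : Int) : List Int → Int → Int
  | [], res => res
  | i :: is, res =>
    let res' := PySem.Int.floordiv (res * (n - r + i)) i
    if res' ≥ 1000000 then 1000000 else altLoopB n r is res'

def nCr3_alt (n : Int) (r : Int) : Int := altLoopB n r (PySem.List.pyRange 1 (r + 1) 1) 1

-- ===== PRECONDITION & SPEC =====

-- Exactly the inputs on which Python A returns: for 2 ≤ r with n < r its recursive gcd is fed
-- nonpositive numbers and raises (RecursionError / ZeroDivisionError), and at (2^31, 1) its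
-- `assert x < 2**31` raises AssertionError.
def Pre_nCr3 (n : Int) (r : Int) : Prop :=
  r ≤ 0 ∨ (r = 1 ∧ n ≠ 2147483648) ∨ (2 ≤ r ∧ r ≤ n)
instance (n : Int) (r : Int) : Decidable (Pre_nCr3 n r) := by unfold Pre_nCr3; infer_instance

def pvWitness_nCr3 : Int × Int := (10, 3)

-- For 2 ≤ r with n < r, A's recursive gcd raises RecursionError (or ZeroDivisionError), and at
-- (2^31, 1) A's assert raises AssertionError; B returns the natural binomial value there.
def Raises_nCr3 (n : Int) (r : Int) : Prop :=
  (2 ≤ r ∧ n < r) ∨ (n = 2147483648 ∧ r = 1)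
instance (n : Int) (r : Int) : Decidable (Raises_nCr3 n r) := by unfold Raises_nCr3; infer_instance

def pvRaiseWitness_nCr3 : Int × Int := (1, 3)
def pvRaiseWitnessOut_nCr3 : Int := 0

def Spec_nCr3 (n : Int) (r : Int) (out : Int) : Prop := out = nCr3_alt n r
instance (n : Int) (r : Int) (out : Int) : Decidable (Spec_nCr3 n r out) := by
  unfold Spec_nCr3; infer_instance

-- ===== CLAIM (what is proved, stated in full; the proofs are below) =====
def Claim_equal_nCr3 : Prop :=
  ∀ (n : Int) (r : Int), Dom_nCr3 n r → Pre_nCr3 n r → Spec_nCr3 n r (nCr3 n r)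

def Claim_raises_nCr3 : Prop :=
  (∀ (n : Int) (r : Int), Dom_nCr3 n r → Raises_nCr3 n r → ¬ Pre_nCr3 n r) ∧
  (Dom_nCr3 (pvRaiseWitness_nCr3.1) (pvRaiseWitness_nCr3.2) ∧
   Raises_nCr3 (pvRaiseWitness_nCr3.1) (pvRaiseWitness_nCr3.2) ∧
   nCr3_alt (pvRaiseWitness_nCr3.1) (pvRaiseWitness_nCr3.2) = pvRaiseWitnessOut_nCr3)

-- ===== LEMMAS AND PROOFS =====

-- ---- proof-side structural twins of A's index-based loops ----

-- structural form of A's inner loop: walk down ys itself instead of indexing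
def cancel : Int → List Int → Int × List Int
  | x, [] => (x, [])
  | x, y :: t =>
    if pygcd x y > 1 then
      ((cancel (PySem.Int.floordiv x (pygcd x y)) t).1,
        PySem.Int.floordiv y (pygcd x y) :: (cancel (PySem.Int.floordiv x (pygcd x y)) t).2)
    else ((cancel x t).1, y :: (cancel x t).2)

-- structural form of A's outer loop
def outerS : List Int → List Int → List Int × List Int
  | [], ys => ([], ys)
  | x :: xt, ys =>
    if ys.all (fun y => y == 1) then (x :: xt, ys)
    else ((cancel x ys).1 :: (outerS xt (cancel x ys).2).1, (outerS xt (cancel x ys).2).2)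

-- Python's gcd is Int.gcd on positive arguments
theorem pygcd_eq_gcd_aux : ∀ (k : Nat) (a b : Int), b.toNat ≤ k → 0 < a → 0 < b →
    pygcd a b = (Int.gcd a b : Int) := by
  intro k
  induction k with
  | zero => intro a b hbk ha hb; omega
  | succ k ih =>
    intro a b hbk ha hb
    unfold pygcd
    rw [if_neg (by omega)]
    by_cases hab : b > a
    · rw [if_pos hab, ih b a (by omega) hb ha, Int.gcd_comm]
    · rw [if_neg hab]
      have hmod : PySem.Int.mod a b = a % b := PySem.Int.mod_eq_emod_of_pos hb
      have h0 : 0 ≤ a % b := Int.emod_nonneg a (by omega)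
      have h1 : a % b < b := Int.emod_lt_of_pos a hb
      by_cases hz : PySem.Int.mod a b = 0
      · rw [if_pos hz]
        have hz' : a % b = 0 := by rw [← hmod]; exact hz
        rw [← Int.gcd_emod a b, hz', Int.gcd_zero_left]
        exact (Int.natAbs_of_nonneg (by omega)).symm
      · rw [if_neg hz]
        have hz' : a % b ≠ 0 := by rw [← hmod]; exact hz
        rw [hmod, ih b (a % b) (by omega) hb (by omega), Int.gcd_comm, Int.gcd_emod]

theorem pygcd_eq_gcd (a b : Int) (ha : 0 < a) (hb : 0 < b) :
    pygcd a b = (Int.gcd a b : Int) :=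
  pygcd_eq_gcd_aux b.toNat a b le_rfl ha hb

theorem cancel_length : ∀ (ys : List Int) (x : Int), (cancel x ys).2.length = ys.length := by
  intro ys
  induction ys with
  | nil => intro x; rfl
  | cons y t ih =>
    intro x
    simp only [cancel]
    split <;> simp [ih]

theorem cancel_spec : ∀ (ys : List Int) (x : Int), 0 < x → (∀ y ∈ ys, 0 < y) →
    0 < (cancel x ys).1 ∧ (cancel x ys).1 ∣ x ∧
    (∀ y' ∈ (cancel x ys).2, 0 < y') ∧
    (∀ y' ∈ (cancel x ys).2, ∃ y ∈ ys, y' ∣ y) ∧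
    (cancel x ys).1 * ys.prod = x * (cancel x ys).2.prod ∧
    (∀ y' ∈ (cancel x ys).2, IsCoprime (cancel x ys).1 y') := by
  intro ys
  induction ys with
  | nil =>
    intro x hx _
    exact ⟨hx, dvd_refl x, by simp [cancel], by simp [cancel], by simp [cancel], by simp [cancel]⟩
  | cons y t ih =>
    intro x hx hys
    have hy : 0 < y := hys y (by simp)
    have hyt : ∀ z ∈ t, 0 < z := fun z hz => hys z (by simp [hz])
    have hg : pygcd x y = (Int.gcd x y : Int) := pygcd_eq_gcd x y hx hy
    by_cases hbig : pygcd x y > 1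
    · have hGpos : (0 : Int) < (Int.gcd x y : Int) := by omega
      have hdx : ((Int.gcd x y : Int)) ∣ x := Int.gcd_dvd_left x y
      have hdy : ((Int.gcd x y : Int)) ∣ y := Int.gcd_dvd_right x y
      have hfx : PySem.Int.floordiv x (pygcd x y) = x / (Int.gcd x y : Int) := by
        rw [hg]; exact PySem.Int.floordiv_eq_ediv_of_pos hGpos
      have hfy : PySem.Int.floordiv y (pygcd x y) = y / (Int.gcd x y : Int) := by
        rw [hg]; exact PySem.Int.floordiv_eq_ediv_of_pos hGpos
      have hxx : x / (Int.gcd x y : Int) * (Int.gcd x y : Int) = x := Int.ediv_mul_cancel hdx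
      have hyy : y / (Int.gcd x y : Int) * (Int.gcd x y : Int) = y := Int.ediv_mul_cancel hdy
      have hx1 : 0 < x / (Int.gcd x y : Int) := by nlinarith [hxx]
      have hy1 : 0 < y / (Int.gcd x y : Int) := by nlinarith [hyy]
      have hcop : IsCoprime (x / (Int.gcd x y : Int)) (y / (Int.gcd x y : Int)) := by
        rw [Int.isCoprime_iff_gcd_eq_one]
        exact Int.gcd_div_gcd_div_gcd (by exact_mod_cast hGpos)
      obtain ⟨hp1, hp2, hp3, hp4, hp5, hp6⟩ := ih (x / (Int.gcd x y : Int)) hx1 hyt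
      simp only [cancel, if_pos hbig, hfx, hfy]
      refine ⟨hp1, hp2.trans ⟨(Int.gcd x y : Int), hxx.symm⟩, ?_, ?_, ?_, ?_⟩
      · intro y' hy'
        rcases List.mem_cons.mp hy' with h | h
        · rw [h]; exact hy1
        · exact hp3 y' h
      · intro y' hy'
        rcases List.mem_cons.mp hy' with h | h
        · exact ⟨y, by simp, h ▸ ⟨(Int.gcd x y : Int), hyy.symm⟩⟩
        · obtain ⟨z, hz, hd⟩ := hp4 y' h
          exact ⟨z, by simp [hz], hd⟩
      · simp only [List.prod_cons]
        calc (cancel (x / (Int.gcd x y : Int)) t).1 * (y * t.prod)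
            = y * ((cancel (x / (Int.gcd x y : Int)) t).1 * t.prod) := by ring
          _ = y * (x / (Int.gcd x y : Int) * (cancel (x / (Int.gcd x y : Int)) t).2.prod) := by
              rw [hp5]
          _ = (y / (Int.gcd x y : Int) * (Int.gcd x y : Int)) *
              (x / (Int.gcd x y : Int) * (cancel (x / (Int.gcd x y : Int)) t).2.prod) := by
              rw [hyy]
          _ = (x / (Int.gcd x y : Int) * (Int.gcd x y : Int)) *
              (y / (Int.gcd x y : Int) * (cancel (x / (Int.gcd x y : Int)) t).2.prod) := by ring
          _ = x * (y / (Int.gcd x y : Int) * (cancel (x / (Int.gcd x y : Int)) t).2.prod) := by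
              rw [hxx]
      · intro y' hy'
        rcases List.mem_cons.mp hy' with h | h
        · rw [h]; exact hcop.of_isCoprime_of_dvd_left hp2
        · exact hp6 y' h
    · have hone : Int.gcd x y = 1 := by
        have hnz : Int.gcd x y ≠ 0 := by
          rw [Ne, Int.gcd_eq_zero_iff]
          rintro ⟨h, -⟩; omega
        omega
      have hcop : IsCoprime x y := Int.isCoprime_iff_gcd_eq_one.mpr hone
      obtain ⟨hp1, hp2, hp3, hp4, hp5, hp6⟩ := ih x hx hyt
      simp only [cancel, if_neg hbig]
      refine ⟨hp1, hp2, ?_, ?_, ?_, ?_⟩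
      · intro y' hy'
        rcases List.mem_cons.mp hy' with h | h
        · rw [h]; exact hy
        · exact hp3 y' h
      · intro y' hy'
        rcases List.mem_cons.mp hy' with h | h
        · exact ⟨y, by simp, h ▸ dvd_refl y⟩
        · obtain ⟨z, hz, hd⟩ := hp4 y' h
          exact ⟨z, by simp [hz], hd⟩
      · simp only [List.prod_cons]
        linear_combination y * hp5
      · intro y' hy'
        rcases List.mem_cons.mp hy' with h | h
        · rw [h]; exact hcop.of_isCoprime_of_dvd_left hp2
        · exact hp6 y' h

theorem outerS_spec : ∀ (xs ys : List Int), (∀ x ∈ xs, 0 < x) → (∀ y ∈ ys, 0 < y) →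
    (∀ x' ∈ (outerS xs ys).1, 0 < x') ∧
    (∀ y' ∈ (outerS xs ys).2, 0 < y') ∧
    (∀ y' ∈ (outerS xs ys).2, ∃ y ∈ ys, y' ∣ y) ∧
    (outerS xs ys).1.prod * ys.prod = xs.prod * (outerS xs ys).2.prod ∧
    (∀ x' ∈ (outerS xs ys).1, ∀ y' ∈ (outerS xs ys).2, IsCoprime x' y') := by
  intro xs
  induction xs with
  | nil =>
    intro ys _ hys
    exact ⟨by simp [outerS], by simpa [outerS] using hys,
      fun y' hy' => ⟨y', by simpa [outerS] using hy', dvd_refl y'⟩, by simp [outerS], by simp [outerS]⟩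
  | cons x xt ih =>
    intro ys hxs hys
    have hx : 0 < x := hxs x (by simp)
    have hxt : ∀ z ∈ xt, 0 < z := fun z hz => hxs z (by simp [hz])
    by_cases hall : ys.all (fun y => y == 1)
    · have hys1 : ∀ y ∈ ys, y = 1 := by
        intro y hy
        have := List.all_eq_true.mp hall y hy
        exact eq_of_beq this
      simp only [outerS, if_pos hall]
      exact ⟨hxs, hys, fun y' hy' => ⟨y', hy', dvd_refl y'⟩, by trivial,
        fun x' _ y' hy' => (hys1 y' hy') ▸ isCoprime_one_right⟩
    · obtain ⟨c1, c1d, c2p, c2d, cprod, ccop⟩ := cancel_spec ys x hx hys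
      obtain ⟨q1p, q2p, q2d, qprod, qcop⟩ := ih (cancel x ys).2 hxt c2p
      simp only [outerS, if_neg hall]
      refine ⟨?_, q2p, ?_, ?_, ?_⟩
      · intro x' hx'
        rcases List.mem_cons.mp hx' with h | h
        · rw [h]; exact c1
        · exact q1p x' h
      · intro y' hy'
        obtain ⟨y2, hy2, hd2⟩ := q2d y' hy'
        obtain ⟨y, hy, hd⟩ := c2d y2 hy2
        exact ⟨y, hy, hd2.trans hd⟩
      · simp only [List.prod_cons]
        linear_combination (outerS xt (cancel x ys).2).1.prod * cprod + x * qprod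
      · intro x' hx' y' hy'
        rcases List.mem_cons.mp hx' with h | h
        · obtain ⟨y2, hy2, hd2⟩ := q2d y' hy'
          exact h ▸ ((ccop y2 hy2).of_isCoprime_of_dvd_right hd2)
        · exact qcop x' h y' hy'

-- ---- translating A's index-based loops to the structural twins ----

theorem getD_append_length (pre : List Int) (y : Int) (t : List Int) (d : Int) :
    (pre ++ y :: t).getD pre.length d = y := by
  rw [List.getD_eq_getElem?_getD, List.getElem?_append_right (le_refl _)]
  simp

theorem set_append_length (pre : List Int) (y v : Int) (t : List Int) :
    (pre ++ y :: t).set pre.length v = pre ++ v :: t := by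
  induction pre with
  | nil => simp
  | cons p ps ih => simp [ih]

theorem innerA_eq_cancel : ∀ (suf pre : List Int) (x : Int),
    innerA x (pre ++ suf)
      (PySem.List.pyRange (pre.length : Int) ((pre.length + suf.length : Nat) : Int) 1)
      = ((cancel x suf).1, pre ++ (cancel x suf).2) := by
  intro suf
  induction suf with
  | nil =>
    intro pre x
    rw [PySem.List.pyRange_one_eq_nil (by simp)]
    simp [innerA, cancel]
  | cons y t ih =>
    intro pre x
    have hlt : (pre.length : Int) < ((pre.length + (y :: t).length : Nat) : Int) := by
      push_cast [List.length_cons]; omega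
    rw [PySem.List.pyRange_one_cons hlt]
    simp only [innerA, PySem.List.pyGetD_natCast, getD_append_length, PySem.List.pySetD_natCast,
      set_append_length]
    by_cases hbig : pygcd x y > 1
    · rw [if_pos hbig]
      have h1 : (pre.length : Int) + 1
          = (((pre ++ [PySem.Int.floordiv y (pygcd x y)]).length : Nat) : Int) := by simp
      have h2 : ((pre.length + (y :: t).length : Nat) : Int)
          = (((pre ++ [PySem.Int.floordiv y (pygcd x y)]).length + t.length : Nat) : Int) := by
        simp; omega
      rw [h1, h2,
        show pre ++ PySem.Int.floordiv y (pygcd x y) :: t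
          = (pre ++ [PySem.Int.floordiv y (pygcd x y)]) ++ t from by simp,
        ih]
      simp only [cancel, if_pos hbig]
      simp
    · rw [if_neg hbig]
      have h1 : (pre.length : Int) + 1 = (((pre ++ [y]).length : Nat) : Int) := by simp
      have h2 : ((pre.length + (y :: t).length : Nat) : Int)
          = (((pre ++ [y]).length + t.length : Nat) : Int) := by simp; omega
      rw [h1, h2, show pre ++ y :: t = (pre ++ [y]) ++ t from by simp, ih]
      simp only [cancel, if_neg hbig]
      simp

theorem outerA_eq_outerS : ∀ (suf pre ys : List Int),
    ys.length = pre.length + suf.length →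
    outerA ((pre.length + suf.length : Nat) : Int)
      (PySem.List.pyRange (pre.length : Int) ((pre.length + suf.length : Nat) : Int) 1)
      (pre ++ suf) ys
      = (pre ++ (outerS suf ys).1, (outerS suf ys).2) := by
  intro suf
  induction suf with
  | nil =>
    intro pre ys hlen
    rw [PySem.List.pyRange_one_eq_nil (by simp)]
    simp [outerA, outerS]
  | cons x xt ih =>
    intro pre ys hlen
    have hlt : (pre.length : Int) < ((pre.length + (x :: xt).length : Nat) : Int) := by
      push_cast [List.length_cons]; omega
    rw [PySem.List.pyRange_one_cons hlt]
    simp only [outerA, PySem.List.pyGetD_natCast, getD_append_length, PySem.List.pySetD_natCast,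
      set_append_length]
    by_cases hall : ys.all (fun y => y == 1)
    · rw [if_pos hall]
      simp only [outerS, if_pos hall]
    · rw [if_neg hall]
      have hinner : innerA x ys
          (PySem.List.pyRange 0 ((pre.length + (x :: xt).length : Nat) : Int) 1)
          = ((cancel x ys).1, (cancel x ys).2) := by
        have h := innerA_eq_cancel ys [] x
        simp only [List.nil_append, List.length_nil] at h
        rw [show (0 + ys.length) = ys.length from by omega, hlen] at h
        simpa using h
      rw [hinner]
      simp only [outerS, if_neg hall]
      have h1 : (pre.length : Int) + 1 = (((pre ++ [(cancel x ys).1]).length : Nat) : Int) := by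
        simp
      have h2 : ((pre.length + (x :: xt).length : Nat) : Int)
          = (((pre ++ [(cancel x ys).1]).length + xt.length : Nat) : Int) := by simp; omega
      have h3 : (cancel x ys).2.length = (pre ++ [(cancel x ys).1]).length + xt.length := by
        rw [cancel_length]
        simp at hlen ⊢
        omega
      rw [h1, h2, show pre ++ (cancel x ys).1 :: xt = (pre ++ [(cancel x ys).1]) ++ xt from by simp,
        ih (pre ++ [(cancel x ys).1]) (cancel x ys).2 h3]
      simp

-- ---- arithmetic facts ----

theorem one_le_list_prod : ∀ (l : List Int), (∀ x ∈ l, 1 ≤ x) → 1 ≤ l.prod := by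
  intro l
  induction l with
  | nil => intro _; simp
  | cons x t ih =>
    intro h
    have hx : 1 ≤ x := h x (by simp)
    have ht : 1 ≤ t.prod := ih (fun z hz => h z (by simp [hz]))
    simp only [List.prod_cons]
    nlinarith

theorem resLoopA_spec : ∀ (l : List Int) (acc : Int), (∀ x ∈ l, 1 ≤ x) →
    1 ≤ acc → acc < 1000000 →
    resLoopA l acc = if 1000000 ≤ acc * l.prod then 1000000 else acc * l.prod := by
  intro l
  induction l with
  | nil =>
    intro acc _ hacc hlt
    simp only [resLoopA, List.prod_nil, mul_one]
    rw [if_neg (by omega)]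
  | cons x t ih =>
    intro acc hmem hacc hlt
    have hx : 1 ≤ x := hmem x (by simp)
    have ht : ∀ z ∈ t, 1 ≤ z := fun z hz => hmem z (by simp [hz])
    have htp : 1 ≤ t.prod := one_le_list_prod t ht
    simp only [resLoopA, List.prod_cons]
    by_cases hc : acc * x ≥ 1000000
    · rw [if_pos hc, if_pos (by nlinarith)]
    · rw [if_neg hc, ih (acc * x) ht (by nlinarith) (by omega), ← mul_assoc]

theorem prod_pyRange_cast : ∀ (R a : Nat),
    (PySem.List.pyRange ((a : Int) + 1) ((a : Int) + 1 + (R : Int)) 1).prod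
      = ((a + 1).ascFactorial R : Int) := by
  intro R
  induction R with
  | zero =>
    intro a
    rw [show ((a : Int) + 1 + ((0 : Nat) : Int)) = (a : Int) + 1 by push_cast; ring,
      PySem.List.pyRange_one_eq_nil le_rfl]
    simp [Nat.ascFactorial_zero]
  | succ R ih =>
    intro a
    rw [show ((a : Int) + 1 + ((R + 1 : Nat) : Int)) = ((a : Int) + 1 + (R : Int)) + 1 by
        push_cast; ring,
      PySem.List.pyRange_one_succ_right (by omega), List.prod_append, List.prod_singleton, ih a,
      Nat.ascFactorial_succ]
    push_cast
    ring

theorem prod_pyRange_fac (R : Nat) :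
    (PySem.List.pyRange 1 ((R : Int) + 1) 1).prod = (R.factorial : Int) := by
  have h := prod_pyRange_cast R 0
  norm_num at h
  rw [show (R : Int) + 1 = 1 + (R : Int) from by ring, h]

theorem isCoprime_list_prod_right : ∀ (l : List Int) (a : Int),
    (∀ b ∈ l, IsCoprime a b) → IsCoprime a l.prod := by
  intro l
  induction l with
  | nil => intro a _; simpa using isCoprime_one_right
  | cons x t ih =>
    intro a h
    simp only [List.prod_cons]
    exact (h x (by simp)).mul_right (ih a (fun b hb => h b (by simp [hb])))

theorem choose_mono_diag (M : Nat) : ∀ (j i : Nat), i ≤ j →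
    (M + i).choose i ≤ (M + j).choose j := by
  intro j
  induction j with
  | zero => intro i hi; simp [Nat.le_zero.mp hi]
  | succ j ih =>
    intro i hi
    rcases Nat.lt_or_ge i (j + 1) with h | h
    · calc (M + i).choose i ≤ (M + j).choose j := ih i (by omega)
        _ ≤ (M + (j + 1)).choose (j + 1) := by
          rw [show M + (j + 1) = (M + j) + 1 from rfl, Nat.choose_succ_succ']
          omega
    · rw [show i = j + 1 from by omega]

-- ---- the two sides, for 0 ≤ r ≤ n ----

theorem A_general (n r : Int) (h0 : 0 ≤ r) (h1 : r ≤ n) :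
    nCr3 n r = if 1000000 ≤ ((((n - r).toNat + r.toNat).choose r.toNat : Nat) : Int)
      then 1000000 else ((((n - r).toNat + r.toNat).choose r.toNat : Nat) : Int) := by
  set R := r.toNat with hR
  set M := (n - r).toNat with hM
  set xs0 := PySem.List.pyRange (n - r + 1) (n + 1) 1 with hxs0
  set ys0 := PySem.List.pyRange 1 (r + 1) 1 with hys0
  have hlenxs : xs0.length = R := by
    rw [hxs0, PySem.List.length_pyRange_one]; omega
  have hlenys : ys0.length = R := by
    rw [hys0, PySem.List.length_pyRange_one]; omega
  have posxs : ∀ x ∈ xs0, 0 < x := by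
    intro x hx
    rw [hxs0, PySem.List.mem_pyRange_one] at hx
    omega
  have posys : ∀ y ∈ ys0, 0 < y := by
    intro y hy
    rw [hys0, PySem.List.mem_pyRange_one] at hy
    omega
  have hxsprod : xs0.prod = ((R.factorial * (M + R).choose R : Nat) : Int) := by
    rw [hxs0, show n - r + 1 = (M : Int) + 1 from by omega,
      show n + 1 = (M : Int) + 1 + (R : Int) from by omega, prod_pyRange_cast R M,
      Nat.ascFactorial_eq_factorial_mul_choose]
  have hysprod : ys0.prod = (R.factorial : Int) := by
    rw [hys0, show r + 1 = (R : Int) + 1 from by omega, prod_pyRange_fac]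
  have htr : outerA r (PySem.List.pyRange 0 r 1) xs0 ys0
      = ((outerS xs0 ys0).1, (outerS xs0 ys0).2) := by
    have h := outerA_eq_outerS xs0 [] ys0 (by simpa using by omega : ys0.length = [].length + xs0.length)
    rw [show ((([] : List Int).length + xs0.length : Nat) : Int) = r from by simp [hlenxs]; omega,
      show ((([] : List Int).length : Nat) : Int) = (0 : Int) from by simp] at h
    simpa using h
  obtain ⟨Sp1, Sp2, _, Sprod, Scop⟩ := outerS_spec xs0 ys0 posxs posys
  rw [hxsprod, hysprod] at Sprod
  have hfpos : (0 : Int) < (R.factorial : Int) := by exact_mod_cast R.factorial_pos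
  have hS1 : (outerS xs0 ys0).1.prod
      = (((M + R).choose R : Nat) : Int) * (outerS xs0 ys0).2.prod := by
    apply mul_right_cancel₀ (b := (R.factorial : Int)) (by omega)
    push_cast at Sprod ⊢
    linarith [Sprod]
  have hcp : IsCoprime (outerS xs0 ys0).1.prod (outerS xs0 ys0).2.prod := by
    apply isCoprime_list_prod_right
    intro b hb
    exact (isCoprime_list_prod_right (outerS xs0 ys0).1 b
      (fun a ha => (Scop a ha b hb).symm)).symm
  have h2pos : 0 < (outerS xs0 ys0).2.prod := List.prod_pos Sp2
  have hdvd : (outerS xs0 ys0).2.prod ∣ (outerS xs0 ys0).1.prod :=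
    ⟨(((M + R).choose R : Nat) : Int), by rw [hS1]; ring⟩
  have hunit := IsCoprime.isUnit_of_dvd' hcp hdvd dvd_rfl
  rw [Int.isUnit_iff] at hunit
  have h21 : (outerS xs0 ys0).2.prod = 1 := by omega
  have hS1C : (outerS xs0 ys0).1.prod = (((M + R).choose R : Nat) : Int) := by
    rw [hS1, h21, mul_one]
  have hsprod : (PySem.List.sorted (outerS xs0 ys0).1 (fun x => x) false).prod
      = (((M + R).choose R : Nat) : Int) := by
    rw [(PySem.List.sorted_perm (outerS xs0 ys0).1 (fun x => x) false).prod_eq, hS1C]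
  have hsmem : ∀ x ∈ PySem.List.sorted (outerS xs0 ys0).1 (fun x => x) false, 1 ≤ x := by
    intro x hx
    have := Sp1 x ((PySem.List.mem_sorted _ _ _ _).mp hx)
    omega
  show resLoopA (PySem.List.sorted (outerA r (PySem.List.pyRange 0 r 1) xs0 ys0).1
    (fun x => x) false) 1 = _
  rw [htr, resLoopA_spec _ 1 hsmem le_rfl (by norm_num), one_mul, hsprod]

theorem altLoopB_spec (M R : Nat) : ∀ (k iN : Nat), iN + k = R → ∀ res : Int,
    res = (((M + iN).choose iN : Nat) : Int) → res < 1000000 →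
    altLoopB ((M : Int) + (R : Int)) (R : Int)
      (PySem.List.pyRange ((iN : Int) + 1) ((R : Int) + 1) 1) res
      = if 1000000 ≤ (((M + R).choose R : Nat) : Int) then 1000000
        else (((M + R).choose R : Nat) : Int) := by
  intro k
  induction k with
  | zero =>
    intro iN hiN res hres hlt
    have hiR : iN = R := by omega
    subst hiR
    rw [PySem.List.pyRange_one_eq_nil le_rfl]
    subst hres
    simp only [altLoopB]
    rw [if_neg (by omega)]
  | succ k ih =>
    intro iN hiN res hres hlt
    have hlt2 : (iN : Int) + 1 < (R : Int) + 1 := by omega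
    rw [PySem.List.pyRange_one_cons hlt2]
    simp only [altLoopB]
    rw [show (M : Int) + (R : Int) - (R : Int) + ((iN : Int) + 1) = ((M + iN : Nat) : Int) + 1 from
        by push_cast; ring]
    have hstep : res * (((M + iN : Nat) : Int) + 1)
        = (((M + iN + 1).choose (iN + 1) : Nat) : Int) * ((iN : Int) + 1) := by
      subst hres
      have h := Nat.add_one_mul_choose_eq (M + iN) iN
      have h' : (M + iN).choose iN * ((M + iN) + 1) = (M + iN + 1).choose (iN + 1) * (iN + 1) := by
        simpa [Nat.succ_eq_add_one, Nat.mul_comm] using h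
      exact_mod_cast h'
    rw [hstep, PySem.Int.floordiv_eq_ediv_of_pos (by omega),
      Int.mul_ediv_cancel _ (by omega)]
    by_cases hcap : (((M + iN + 1).choose (iN + 1) : Nat) : Int) ≥ 1000000
    · rw [if_pos hcap]
      have hmono : ((M + (iN + 1)).choose (iN + 1)) ≤ ((M + R).choose R) :=
        choose_mono_diag M R (iN + 1) (by omega)
      rw [if_pos (le_trans hcap (by exact_mod_cast by simpa [← Nat.add_assoc] using hmono))]
    · rw [if_neg hcap]
      have h := ih (iN + 1) (by omega) (((M + iN + 1).choose (iN + 1) : Nat) : Int)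
        (by norm_num [Nat.add_assoc]) (by omega)
      rw [show (iN : Int) + 1 + 1 = ((iN + 1 : Nat) : Int) + 1 from by push_cast; ring]
      exact h

theorem B_general (n r : Int) (h0 : 0 ≤ r) (h1 : r ≤ n) :
    nCr3_alt n r = if 1000000 ≤ ((((n - r).toNat + r.toNat).choose r.toNat : Nat) : Int)
      then 1000000 else ((((n - r).toNat + r.toNat).choose r.toNat : Nat) : Int) := by
  have h := altLoopB_spec (n - r).toNat r.toNat r.toNat 0 (by omega) 1 (by simp) (by norm_num)
  rw [show (((n - r).toNat : Nat) : Int) + ((r.toNat : Nat) : Int) = n from by omega,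
    show ((r.toNat : Nat) : Int) = r from by omega,
    show (((0 : Nat) : Nat) : Int) + 1 = (1 : Int) from by simp] at h
  exact h

-- ---- the corner cases Pre_ admits outside 0 ≤ r ≤ n ----

theorem eq_of_nonpos (n r : Int) (h : r ≤ 0) : nCr3 n r = nCr3_alt n r := by
  unfold nCr3 nCr3_alt
  rw [PySem.List.pyRange_one_eq_nil (show n + 1 ≤ n - r + 1 by omega),
    PySem.List.pyRange_one_eq_nil (show r + 1 ≤ 1 by omega),
    PySem.List.pyRange_one_eq_nil (show r ≤ 0 by omega)]
  rfl

theorem eq_of_one (n : Int) : nCr3 n 1 = nCr3_alt n 1 := by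
  show resLoopA (PySem.List.sorted
      (outerA 1 (PySem.List.pyRange 0 1 1)
        (PySem.List.pyRange (n - 1 + 1) (n + 1) 1) (PySem.List.pyRange 1 (1 + 1) 1)).1
      (fun x => x) false) 1
    = altLoopB n 1 (PySem.List.pyRange 1 (1 + 1) 1) 1
  rw [show n - 1 + 1 = n from by ring]
  rw [PySem.List.pyRange_one_cons (show n < n + 1 by omega),
    PySem.List.pyRange_one_eq_nil (le_refl (n + 1)),
    show PySem.List.pyRange 1 (1 + 1) 1 = [1] from by decide,
    show PySem.List.pyRange 0 1 1 = [0] from by decide]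
  have houter : outerA 1 [0] [n] [1] = ([n], [1]) := by
    simp [outerA]
  rw [houter]
  have hsorted : PySem.List.sorted [n] (fun x => x) false = [n] :=
    PySem.List.sorted_eq_self_of_pairwise [n] (fun x => x) (List.pairwise_singleton _ _)
  rw [hsorted]
  simp only [resLoopA, altLoopB]
  rw [show n - 1 + 1 = n from by ring,
    PySem.Int.floordiv_eq_ediv_of_pos (show (0:Int) < 1 by norm_num), Int.ediv_one]

-- ===== VERDICT (by name: the statement is the Claim_ definition above) =====
theorem nCr3_spec : Claim_equal_nCr3 := by
  intro n r _ hpre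
  unfold Spec_nCr3
  rcases hpre with h | ⟨h, _⟩ | ⟨h2, hn⟩
  · exact eq_of_nonpos n r h
  · subst h; exact eq_of_one n
  · rw [A_general n r (by omega) hn, B_general n r (by omega) hn]

theorem nCr3_raises : Claim_raises_nCr3 := by
  unfold Claim_raises_nCr3
  constructor
  · intro n r _ hr
    unfold Raises_nCr3 at hr
    unfold Pre_nCr3
    omega
  · refine ⟨by decide, by decide, by decide⟩

-- self-check: the crash-fix witness really evaluates as claimed
theorem nCr3_raises_witness_ok : nCr3_alt 1 3 = 0 := nCr3_raises.2.2.2
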